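-- pv_equiv track=rewrite | github.com/inc-research/spellcaster | statistics.py | repetition_intervals
-- ===== SOURCE A (Python) =====
-- def repetition_intervals(
--     tokens: list[str],
--     keywords: list[str],
-- ) -> dict[str, list[int]]:
--     """
--     Compute the token-distance between consecutive occurrences of each keyword.
--
--     Parameters
--     ----------
--     tokens : list[str]
--         Ordered token sequence (e.g. lemmas from a document).
--     keywords : list[str]
--         Keywords to track.
--
--     Returns
--     -------
--     dict mapping each keyword to its list of inter-occurrence gaps (in tokens).
--     A keyword with fewer than two occurrences will have an empty list.
--     """
--     intervals: dict[str, list[int]] = {kw: [] for kw in keywords}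
--     last_seen: dict[str, int] = {}
--
--     keyword_set = set(keywords)
--     for i, token in enumerate(tokens):
--         if token in keyword_set:
--             if token in last_seen:
--                 intervals[token].append(i - last_seen[token])
--             last_seen[token] = i
--
--     return intervals
-- ===== SOURCE B (Python) =====
-- def repetition_intervals(
--     tokens: list[str],
--     keywords: list[str],
-- ) -> dict[str, list[int]]:
--     # Phase 1: index every keyword to the list of token positions where it occurs.
--     positions: dict[str, list[int]] = {kw: [] for kw in keywords}
--     for i, token in enumerate(tokens):
--         if token in positions:
--             positions[token].append(i)
--     # Phase 2: gaps are the consecutive differences of each position list.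
--     return {
--         kw: [nxt - prev for prev, nxt in zip(ps, ps[1:])]
--         for kw, ps in positions.items()
--     }
-- ===== Notes on version B (the rewrite author's own statement) =====
-- stated objective: alternative
-- what changed: B replaces A's single pass that threads two dicts (running intervals plus last-seen index) with a two-phase decomposition: first build a positions index mapping each keyword to all its token indices, then derive each gap list as the consecutive differences of that position list.
import Mathlib
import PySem

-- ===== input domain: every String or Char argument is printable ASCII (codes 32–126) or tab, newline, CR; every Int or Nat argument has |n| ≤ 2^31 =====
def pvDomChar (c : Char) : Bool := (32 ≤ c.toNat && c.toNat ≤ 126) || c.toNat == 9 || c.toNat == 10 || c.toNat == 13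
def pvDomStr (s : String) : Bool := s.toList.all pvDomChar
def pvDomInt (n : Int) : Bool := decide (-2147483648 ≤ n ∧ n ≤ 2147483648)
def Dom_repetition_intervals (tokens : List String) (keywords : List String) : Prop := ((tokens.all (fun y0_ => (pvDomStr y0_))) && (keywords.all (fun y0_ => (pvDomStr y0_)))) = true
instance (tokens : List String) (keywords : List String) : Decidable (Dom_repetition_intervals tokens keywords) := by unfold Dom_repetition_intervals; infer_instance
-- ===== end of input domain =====

-- B replaces A's one-pass twin-dict scan (running intervals + last-seen index) by a two-phase
-- decomposition: build a positions index per keyword, then take consecutive differences.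

-- ===== PORT A =====
-- loop body of A's 'for i, token in enumerate(tokens)' over the state (intervals, last_seen)
def pvStepA (keyword_set : PySem.Set String)
    (st : PySem.Dict String (List Int) × PySem.Dict String Int) (p : Int × String) :
    PySem.Dict String (List Int) × PySem.Dict String Int :=
  if keyword_set.contains p.2 then
    let intervals' :=
      match st.2.get? p.2 with
      | some j => st.1.modify p.2 [] (fun l => l ++ [p.1 - j])   -- intervals[token].append(i - last_seen[token])
      | none => st.1
    (intervals', st.2.insert p.2 p.1)                            -- last_seen[token] = i
  else st

def repetition_intervals (tokens : List String) (keywords : List String) : List (String × List Int) :=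
  let intervals : PySem.Dict String (List Int) :=
    keywords.foldl (fun d kw => d.insert kw []) PySem.Dict.empty      -- {kw: [] for kw in keywords}
  let keyword_set : PySem.Set String := PySem.Set.ofList keywords
  let st := (PySem.List.enumerate tokens).foldl (pvStepA keyword_set) (intervals, PySem.Dict.empty)
  st.1.items

-- ===== PORT B =====
-- [nxt - prev for prev, nxt in zip(ps, ps[1:])]
def pvDiffs (ps : List Int) : List Int := (ps.zip ps.tail).map (fun pq => pq.2 - pq.1)

-- loop body of B's phase 1: record the position of each keyword occurrence
def pvStepB (d : PySem.Dict String (List Int)) (p : Int × String) : PySem.Dict String (List Int) :=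
  if d.contains p.2 then d.modify p.2 [] (fun l => l ++ [p.1]) else d

def repetition_intervals_alt (tokens : List String) (keywords : List String) : List (String × List Int) :=
  let positions : PySem.Dict String (List Int) :=
    keywords.foldl (fun d kw => d.insert kw []) PySem.Dict.empty      -- {kw: [] for kw in keywords}
  let positions := (PySem.List.enumerate tokens).foldl pvStepB positions
  positions.items.map (fun kv => (kv.1, pvDiffs kv.2))

-- ===== PRECONDITION & SPEC =====
def Spec_repetition_intervals (tokens : List String) (keywords : List String) (out : List (String × List Int)) : Prop := out = repetition_intervals_alt tokens keywords
instance (tokens : List String) (keywords : List String) (out : List (String × List Int)) : Decidable (Spec_repetition_intervals tokens keywords out) := by unfold Spec_repetition_intervals; infer_instance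

-- ===== CLAIM (what is proved, stated in full; the proofs are below) =====
def Claim_equal_repetition_intervals : Prop := ∀ (tokens : List String) (keywords : List String), Dom_repetition_intervals tokens keywords → Spec_repetition_intervals tokens keywords (repetition_intervals tokens keywords)

-- ===== LEMMAS AND PROOFS =====

theorem pvDiffs_append (ps : List Int) (x : Int) :
    pvDiffs (ps ++ [x]) = pvDiffs ps ++ (match ps.getLast? with | none => [] | some j => [x - j]) := by
  induction ps with
  | nil => simp [pvDiffs]
  | cons a t ih =>
    cases t with
    | nil => simp [pvDiffs]
    | cons b t' =>
      have h1 : pvDiffs (a :: b :: (t' ++ [x])) = (b - a) :: pvDiffs (b :: (t' ++ [x])) := by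
        simp [pvDiffs]
      have h2 : pvDiffs (a :: b :: t') = (b - a) :: pvDiffs (b :: t') := by simp [pvDiffs]
      simp only [List.cons_append] at ih ⊢
      rw [h1, ih, h2]
      simp [List.getLast?]

theorem pv_init_getD (kws : List String) (d : PySem.Dict String (List Int))
    (h : ∀ k, d.getD k [] = []) :
    ∀ k, (kws.foldl (fun d kw => d.insert kw []) d).getD k [] = [] := by
  induction kws generalizing d with
  | nil => simpa using h
  | cons kw rest ih =>
    intro k
    simp only [List.foldl_cons]
    exact ih _ (fun k' => by rw [PySem.Dict.getD_insert]; split <;> simp [h]) k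

-- the main loop invariant: A's (intervals, last_seen) vs B's positions
theorem pv_main (e : List (Int × String)) (kwset : PySem.Set String) :
    ∀ (ia : PySem.Dict String (List Int)) (ls : PySem.Dict String Int)
      (pb : PySem.Dict String (List Int)),
    (∀ t, pb.contains t = kwset.contains t) →
    ia.keys = pb.keys →
    (∀ k, ia.getD k [] = pvDiffs (pb.getD k [])) →
    (∀ k, pb.contains k = true → ls.get? k = (pb.getD k []).getLast?) →
    (e.foldl (pvStepA kwset) (ia, ls)).1.keys = (e.foldl pvStepB pb).keys ∧
    (e.foldl pvStepB pb).keys = pb.keys ∧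
    (∀ k, (e.foldl (pvStepA kwset) (ia, ls)).1.getD k [] = pvDiffs ((e.foldl pvStepB pb).getD k [])) := by
  induction e with
  | nil => intro ia ls pb _ hkeys hval _; exact ⟨hkeys, rfl, hval⟩
  | cons p rest ih =>
    intro ia ls pb hcon hkeys hval hlast
    obtain ⟨i, t⟩ := p
    simp only [List.foldl_cons]
    by_cases hmem : kwset.contains t = true
    · have hpbt : pb.contains t = true := by rw [hcon]; exact hmem
      have htmem : t ∈ kwset := (PySem.Set.contains_iff _ _).mp hmem
      have hstB : pvStepB pb (i, t) = pb.modify t [] (fun l => l ++ [i]) := by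
        simp [pvStepB, hpbt]
      have hkeysB : (pb.modify t [] (fun l => l ++ [i])).keys = pb.keys := by
        rw [PySem.Dict.keys_modify, PySem.Dict.keys_insert_of_contains _ _ hpbt]
      have hconB : ∀ x, (pvStepB pb (i, t)).contains x = kwset.contains x := by
        intro x
        rw [hstB, PySem.Dict.contains_modify]
        by_cases hx : x = t
        · subst hx; simp [hpbt, htmem]
        · simp [hcon, beq_eq_false_iff_ne.mpr hx]
      have hiat : ia.contains t = true := by
        rw [PySem.Dict.contains_iff_mem_keys, hkeys, ← PySem.Dict.contains_iff_mem_keys]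
        exact hpbt
      -- A's step
      have hlt := hlast t hpbt
      have hstA : pvStepA kwset (ia, ls) (i, t) =
          ((match ls.get? t with
            | some j => ia.modify t [] (fun l => l ++ [i - j])
            | none => ia), ls.insert t i) := by
        simp [pvStepA, htmem]
      set ia' := (match ls.get? t with
            | some j => ia.modify t [] (fun l => l ++ [i - j])
            | none => ia) with hia'
      have hkeysA : ia'.keys = ia.keys := by
        rw [hia']
        cases ls.get? t with
        | none => rfl
        | some j => rw [PySem.Dict.keys_modify, PySem.Dict.keys_insert_of_contains _ _ hiat]
      have hvals : ∀ k, ia'.getD k [] = pvDiffs ((pvStepB pb (i, t)).getD k []) := by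
        intro k
        rw [hstB]
        by_cases hk : k = t
        · subst hk
          rw [PySem.Dict.getD_modify_self, pvDiffs_append, hia']
          cases hg : ls.get? k with
          | none =>
            rw [hg] at hlt
            rw [← hlt]
            simp [hval k]
          | some j =>
            rw [hg] at hlt
            rw [← hlt]
            simp [PySem.Dict.getD_modify_self, hval k]
        · rw [PySem.Dict.getD_modify_of_ne _ _ _ hk, hia']
          cases ls.get? t with
          | none => exact hval k
          | some j => rw [PySem.Dict.getD_modify_of_ne _ _ _ hk]; exact hval k
      have hlast' : ∀ k, (pvStepB pb (i, t)).contains k = true →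
          (ls.insert t i).get? k = ((pvStepB pb (i, t)).getD k []).getLast? := by
        intro k hkc
        rw [hstB] at hkc ⊢
        by_cases hk : k = t
        · subst hk
          rw [PySem.Dict.get?_insert_self, PySem.Dict.getD_modify_self]
          simp
        · rw [PySem.Dict.get?_insert_of_ne _ _ hk, PySem.Dict.getD_modify_of_ne _ _ _ hk]
          apply hlast
          rw [PySem.Dict.contains_modify] at hkc
          simpa [beq_eq_false_iff_ne.mpr hk] using hkc
      have := ih ia' (ls.insert t i) (pvStepB pb (i, t)) hconB
        (by rw [hkeysA, hkeys, hstB, hkeysB]) hvals hlast'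
      rw [hstA]
      refine ⟨this.1, ?_, this.2.2⟩
      rw [this.2.1, hstB, hkeysB]
    · have hpbt : pb.contains t = false := by rw [hcon]; simpa using hmem
      have htnot : t ∉ kwset := fun h => hmem ((PySem.Set.contains_iff _ _).mpr h)
      have hA : pvStepA kwset (ia, ls) (i, t) = (ia, ls) := by simp [pvStepA, htnot]
      have hB : pvStepB pb (i, t) = pb := by simp [pvStepB, hpbt]
      rw [hA, hB]
      exact ih ia ls pb hcon hkeys hval hlast

-- ===== VERDICT (by name: the statement is the Claim_ definition above) =====
theorem repetition_intervals_spec : Claim_equal_repetition_intervals := by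
  unfold Claim_equal_repetition_intervals
  intro tokens keywords _
  unfold Spec_repetition_intervals repetition_intervals repetition_intervals_alt
  set init : PySem.Dict String (List Int) :=
    keywords.foldl (fun d kw => d.insert kw []) PySem.Dict.empty with hinit
  have hnodup : init.keys.Nodup := by
    rw [hinit]
    exact PySem.Dict.nodup_keys_foldl_insert _ _ _ (by simp)
  have hkeys_init : init.keys = PySem.Set.ofList keywords := by
    rw [hinit, PySem.Dict.keys_foldl_insert]
    simp [PySem.Set.update_nil_left]
  have hcon : ∀ t, init.contains t = (PySem.Set.ofList keywords).contains t := by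
    intro t
    rw [Bool.eq_iff_iff, PySem.Dict.contains_iff_mem_keys, hkeys_init, PySem.Set.contains_iff]
  have hgd : ∀ k, init.getD k [] = [] := pv_init_getD keywords _ (by simp)
  have hval : ∀ k, init.getD k [] = pvDiffs (init.getD k []) := by
    intro k; rw [hgd k]; rfl
  have hlast : ∀ k, init.contains k = true →
      (PySem.Dict.empty : PySem.Dict String Int).get? k = (init.getD k []).getLast? := by
    intro k _; rw [hgd k]; rfl
  obtain ⟨h1, h2, h3⟩ := pv_main (PySem.List.enumerate tokens) (PySem.Set.ofList keywords)
    init PySem.Dict.empty init hcon rfl hval hlast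
  set A := ((PySem.List.enumerate tokens).foldl (pvStepA (PySem.Set.ofList keywords))
    (init, PySem.Dict.empty)).1
  set B := (PySem.List.enumerate tokens).foldl pvStepB init
  have hnodupB : B.keys.Nodup := by rw [h2]; exact hnodup
  have hnodupA : A.keys.Nodup := by rw [h1]; exact hnodupB
  show A.items = List.map (fun kv => (kv.1, pvDiffs kv.2)) B.items
  rw [PySem.Dict.items_eq_map_keys A hnodupA [], PySem.Dict.items_eq_map_keys B hnodupB [],
    List.map_map, h1]
  apply List.map_congr_left
  intro k _
  simp [h3 k]
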